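-- pv_equiv track=rewrite | github.com/ManasVegi/Competitive-Programming | Leetcode/Python/sort_by_order_of_encountering.py | sortByEncOrderN
-- ===== SOURCE A (Python) =====
-- def sortByEncOrderN(A):
--     fMap = {}
--     for a in A:
--         if a in fMap:
--             fMap[a] += 1
--         else:
--             fMap[a] = 1
--
--     ans = []
--     for a in A:
--         ans.extend([a] * fMap[a])
--         fMap[a] = 0
--     return ans
-- ===== SOURCE B (Python) =====
-- def sortByEncOrderN(A):
--     counts = {}
--     for a in A:
--         counts[a] = counts.get(a, 0) + 1
--     ans = []
--     for a, c in counts.items():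
--         ans.extend([a] * c)
--     return ans
-- ===== Notes on version B (the rewrite author's own statement) =====
-- stated objective: simpler
-- what changed: B drops A's second full scan of the list with its zero-reset dedup trick: it builds the count dict in one pass and then emits [element]*count directly from the dict's items(), which keep first-encounter order.
import Mathlib
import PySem

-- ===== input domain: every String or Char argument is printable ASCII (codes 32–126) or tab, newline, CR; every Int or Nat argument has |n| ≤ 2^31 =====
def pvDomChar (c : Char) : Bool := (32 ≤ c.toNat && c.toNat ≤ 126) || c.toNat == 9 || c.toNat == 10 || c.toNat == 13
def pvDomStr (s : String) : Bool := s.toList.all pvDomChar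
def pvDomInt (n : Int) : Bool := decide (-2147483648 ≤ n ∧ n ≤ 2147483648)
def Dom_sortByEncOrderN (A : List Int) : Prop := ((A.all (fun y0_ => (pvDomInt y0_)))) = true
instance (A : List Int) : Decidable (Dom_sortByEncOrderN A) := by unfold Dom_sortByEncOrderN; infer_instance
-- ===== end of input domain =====

-- B builds the count dict in one pass and emits [element]*count straight from its items()
-- (first-encounter order), replacing A's second full scan with the zero-reset trick: simpler.

-- ===== PORT A =====
-- second loop: Python's fMap[a] never raises here because every element of A is a key of fMap;
-- ported as getD a 0, exact on this program's states.
def sortByEncOrderN (A : List Int) : List Int :=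
  let fMap : PySem.Dict Int Int :=
    A.foldl (fun d a => if d.contains a then d.insert a (d.getD a 0 + 1) else d.insert a 1)
      PySem.Dict.empty
  (A.foldl (fun (p : List Int × PySem.Dict Int Int) a =>
      (p.1 ++ PySem.List.pyRepeat [a] (p.2.getD a 0), p.2.insert a 0)) (([] : List Int), fMap)).1

-- ===== PORT B =====
def sortByEncOrderN_alt (A : List Int) : List Int :=
  let counts : PySem.Dict Int Int :=
    A.foldl (fun d a => d.insert a (d.getD a 0 + 1)) PySem.Dict.empty
  counts.items.foldl (fun ans p => ans ++ PySem.List.pyRepeat [p.1] p.2) []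

-- ===== PRECONDITION & SPEC =====
def Spec_sortByEncOrderN (A : List Int) (out : List Int) : Prop := out = sortByEncOrderN_alt A
instance (A : List Int) (out : List Int) : Decidable (Spec_sortByEncOrderN A out) := by unfold Spec_sortByEncOrderN; infer_instance

-- ===== CLAIM (what is proved, stated in full; the proofs are below) =====
def Claim_equal_sortByEncOrderN : Prop := ∀ (A : List Int), Dom_sortByEncOrderN A → Spec_sortByEncOrderN A (sortByEncOrderN A)

-- ===== LEMMAS AND PROOFS =====

-- A's first loop builds exactly Counter(A)
lemma dictA_eq_counter (A : List Int) :
    A.foldl (fun d a => if d.contains a then d.insert a (d.getD a 0 + 1) else d.insert a 1)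
      PySem.Dict.empty = PySem.Dict.counter A := by
  rw [← PySem.Dict.foldl_insert_getD_add_one_eq_counter]
  apply PySem.List.foldl_congr_mem
  intro d x _
  by_cases h : d.contains x = true
  · simp [h]
  · simp only [Bool.not_eq_true] at h
    simp [h, PySem.Dict.getD_of_not_contains d 0 h]

-- the accumulator of A's second loop factors out
lemma loopA_acc (l : List Int) (acc : List Int) (m : PySem.Dict Int Int) :
    (l.foldl (fun (p : List Int × PySem.Dict Int Int) a =>
        (p.1 ++ PySem.List.pyRepeat [a] (p.2.getD a 0), p.2.insert a 0)) (acc, m)).1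
      = acc ++ (l.foldl (fun (p : List Int × PySem.Dict Int Int) a =>
        (p.1 ++ PySem.List.pyRepeat [a] (p.2.getD a 0), p.2.insert a 0)) (([] : List Int), m)).1 := by
  induction l generalizing acc m with
  | nil => simp
  | cons a t ih =>
    simp only [List.foldl_cons, List.nil_append]
    rw [ih, ih (PySem.List.pyRepeat [a] (m.getD a 0))]
    simp [List.append_assoc]

-- zeroing key a in the dict = dropping a from the keys walked
lemma flatMap_insert_zero (s : List Int) (m : PySem.Dict Int Int) (a : Int) :
    s.flatMap (fun k => PySem.List.pyRepeat [k] ((m.insert a 0).getD k 0))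
      = (PySem.Set.discard s a).flatMap (fun k => PySem.List.pyRepeat [k] (m.getD k 0)) := by
  simp only [PySem.Set.discard, PySem.List.pyRepeat_singleton]
  induction s with
  | nil => simp
  | cons k t ih =>
    by_cases h : k = a
    · subst h
      simp [PySem.Dict.getD_insert_self, ih]
    · simp [h, PySem.Dict.getD_insert_of_ne m 0 0 h, ih]

-- A's second loop is a flatMap over the distinct elements in first-encounter order
lemma loopA_flatMap (l : List Int) (m : PySem.Dict Int Int) :
    (l.foldl (fun (p : List Int × PySem.Dict Int Int) a =>
        (p.1 ++ PySem.List.pyRepeat [a] (p.2.getD a 0), p.2.insert a 0)) (([] : List Int), m)).1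
      = (PySem.Set.ofList l).flatMap (fun k => PySem.List.pyRepeat [k] (m.getD k 0)) := by
  induction l generalizing m with
  | nil => simp [PySem.Set.ofList]
  | cons a t ih =>
    simp only [List.foldl_cons]
    rw [loopA_acc, ih, PySem.Set.ofList_cons, List.flatMap_cons, flatMap_insert_zero]
    simp

-- ===== VERDICT (by name: the statement is the Claim_ definition above) =====
theorem sortByEncOrderN_spec : Claim_equal_sortByEncOrderN := by
  intro A _
  unfold Spec_sortByEncOrderN sortByEncOrderN sortByEncOrderN_alt
  simp only [dictA_eq_counter, PySem.Dict.foldl_insert_getD_add_one_eq_counter,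
    loopA_flatMap, PySem.List.foldl_append_eq_flatMap, PySem.Dict.items_counter,
    List.flatMap_map, List.nil_append]
  exact List.flatMap_congr (fun k _ => by rw [PySem.Dict.getD_counter])
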